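-- pv_equiv track=rewrite | github.com/john-bry/leetcode | greedy/3597_partition_string.py | partition_string
-- ===== SOURCE A (Python) =====
-- from typing import List
--
-- def partition_string(s: str) -> List[str]:
--     seen = set()
--     partition = ''
--     partitions = []
--
--     for char in s:
--         partition += char
--
--         if partition not in seen:
--             seen.add(partition)
--             partitions.append(partition)
--             partition = ''
--
--     return partitions
-- ===== SOURCE B (Python) =====
-- def partition_string(s):
--     # Trie over previously emitted chunks: edges keyed by (node_id, char).
--     # One dict step per character instead of building and hashing a fresh
--     # candidate string on every step.
--     nodes = {}          # (node_id, char) -> child node_id; root is 0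
--     next_id = 1
--     cur = 0             # trie node reached by the current chunk
--     start = 0           # start index of the current chunk
--     partitions = []
--     for i, char in enumerate(s):
--         nxt = nodes.get((cur, char))
--         if nxt is None:
--             nodes[(cur, char)] = next_id
--             next_id += 1
--             partitions.append(s[start:i + 1])
--             cur = 0
--             start = i + 1
--         else:
--             cur = nxt
--     return partitions
-- ===== Notes on version B (the rewrite author's own statement) =====
-- stated objective: alternative
-- what changed: Replaces the set of emitted substrings (membership test hashes a freshly built candidate string each step) by an incremental trie stored as a dict keyed by (node_id, char): the scan advances one trie edge per character and emits a chunk exactly when the edge is missing.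
import Mathlib
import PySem

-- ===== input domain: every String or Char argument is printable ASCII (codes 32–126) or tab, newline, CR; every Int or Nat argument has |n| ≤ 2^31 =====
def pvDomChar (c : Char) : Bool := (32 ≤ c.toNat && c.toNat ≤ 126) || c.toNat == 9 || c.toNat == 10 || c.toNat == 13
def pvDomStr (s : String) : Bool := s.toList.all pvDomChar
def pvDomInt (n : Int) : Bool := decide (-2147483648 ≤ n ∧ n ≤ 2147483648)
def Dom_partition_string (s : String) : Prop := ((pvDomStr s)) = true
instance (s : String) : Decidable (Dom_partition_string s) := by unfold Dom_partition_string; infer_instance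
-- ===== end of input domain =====

-- B (alternative algorithm): replaces A's set of emitted substrings by an incremental trie
-- stored as a dict keyed by (node_id, char) — one dict step per character, no rebuilt strings.

-- ===== PORT A =====
-- loop body of A: partition += char; if partition not in seen: add, append, reset
def stepA (acc : PySem.Set String × String × List String) (c : Char) :
    PySem.Set String × String × List String :=
  let seen := acc.1
  let partition := acc.2.1.push c
  let partitions := acc.2.2
  if PySem.Set.contains seen partition = false then
    (PySem.Set.add seen partition, "", partitions ++ [partition])
  else
    (seen, partition, partitions)

def partition_string (s : String) : List String :=
  (s.toList.foldl stepA (PySem.Set.empty, "", [])).2.2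

-- ===== PORT B =====
-- loop body of B: follow/create the trie edge (cur, char); on a new edge emit s[start:i+1]
-- state = (nodes, next_id, cur, start, partitions)
def stepB (s : String) (acc : PySem.Dict (Int × Char) Int × Int × Int × Int × List String)
    (ic : Int × Char) : PySem.Dict (Int × Char) Int × Int × Int × Int × List String :=
  let nodes := acc.1
  let nextId := acc.2.1
  let cur := acc.2.2.1
  let start := acc.2.2.2.1
  let partitions := acc.2.2.2.2
  match PySem.Dict.get? nodes (cur, ic.2) with
  | none => (PySem.Dict.insert nodes (cur, ic.2) nextId, nextId + 1, 0, ic.1 + 1,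
             partitions ++ [PySem.Str.slice s (some start) (some (ic.1 + 1))])
  | some nxt => (nodes, nextId, nxt, start, partitions)

def partition_string_alt (s : String) : List String :=
  ((PySem.List.enumerate s.toList 0).foldl (stepB s) (PySem.Dict.empty, 1, 0, 0, [])).2.2.2.2

-- ===== PRECONDITION & SPEC =====
def Spec_partition_string (s : String) (out : List String) : Prop := out = partition_string_alt s
instance (s : String) (out : List String) : Decidable (Spec_partition_string s out) := by unfold Spec_partition_string; infer_instance

-- ===== CLAIM (what is proved, stated in full; the proofs are below) =====
def Claim_equal_partition_string : Prop := ∀ (s : String), Dom_partition_string s → Spec_partition_string s (partition_string s)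

-- ===== LEMMAS AND PROOFS =====

-- walk the trie from node v along the characters of t
def trieFollow (nodes : PySem.Dict (Int × Char) Int) : Int → List Char → Option Int
  | v, [] => some v
  | v, c :: t =>
    match nodes.get? (v, c) with
    | none => none
    | some w => trieFollow nodes w t

lemma trieFollow_snoc (nodes : PySem.Dict (Int × Char) Int) (v : Int) (t : List Char) (c : Char) :
    trieFollow nodes v (t ++ [c]) =
      (trieFollow nodes v t).bind (fun w => nodes.get? (w, c)) := by
  induction t generalizing v with
  | nil =>
    simp only [List.nil_append, trieFollow]
    cases h : nodes.get? (v, c) <;> simp [h]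
  | cons d t ih =>
    simp only [List.cons_append, trieFollow]
    cases h : nodes.get? (v, d) <;> simp [ih]

lemma trieFollow_val (nodes : PySem.Dict (Int × Char) Int) (w : Int) (t : List Char) (v : Int)
    (h : trieFollow nodes w t = some v) : v = w ∨ ∃ k, nodes.get? k = some v := by
  induction t generalizing w with
  | nil => simp [trieFollow] at h; exact Or.inl h.symm
  | cons c t ih =>
    simp only [trieFollow] at h
    cases hg : nodes.get? (w, c) with
    | none => simp [hg] at h
    | some u =>
      rw [hg] at h
      rcases ih u h with h' | h'
      · exact Or.inr ⟨(w, c), h' ▸ hg⟩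
      · exact Or.inr h'

-- the trie-side well-formedness carried through the loop
def TrieInv (nodes : PySem.Dict (Int × Char) Int) (nextId : Int)
    (seen : PySem.Set String) : Prop :=
  (∀ t : List Char, (trieFollow nodes 0 t).isSome ↔ (t = [] ∨ String.ofList t ∈ seen)) ∧
  (∀ k v, nodes.get? k = some v → k.1 < nextId ∧ 0 < v ∧ v < nextId) ∧
  1 ≤ nextId ∧
  (∀ t₁ t₂ v, trieFollow nodes 0 t₁ = some v → trieFollow nodes 0 t₂ = some v → t₁ = t₂)

lemma trieFollow_lt {nodes : PySem.Dict (Int × Char) Int} {nextId : Int} {seen : PySem.Set String}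
    (hI : TrieInv nodes nextId seen) {t : List Char} {v : Int}
    (h : trieFollow nodes 0 t = some v) : v < nextId := by
  rcases trieFollow_val nodes 0 t v h with rfl | ⟨k, hk⟩
  · exact hI.2.2.1
  · exact (hI.2.1 k v hk).2.2

-- inserting a fresh edge (cur, c) ↦ nextId adds exactly the path p ++ [c]
lemma trieFollow_insert {nodes : PySem.Dict (Int × Char) Int} {nextId : Int}
    {seen : PySem.Set String} (hI : TrieInv nodes nextId seen)
    {p : List Char} {cur : Int} (hp : trieFollow nodes 0 p = some cur)
    {c : Char} (hmiss : nodes.get? (cur, c) = none) :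
    ∀ t : List Char, trieFollow (nodes.insert (cur, c) nextId) 0 t =
      if t = p ++ [c] then some nextId else trieFollow nodes 0 t := by
  intro t
  induction t using List.reverseRecOn with
  | nil =>
    have h0 : ([] : List Char) ≠ p ++ [c] := by simp
    rw [if_neg h0]
    rfl
  | append_singleton t d ih =>
    have h3 : trieFollow nodes 0 (p ++ [c]) = none := by
      rw [trieFollow_snoc, hp, Option.bind_some, hmiss]
    rw [trieFollow_snoc, ih, trieFollow_snoc]
    by_cases ht : t = p ++ [c]
    · subst ht
      have hne : (p ++ [c]) ++ [d] ≠ p ++ [c] := by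
        intro h; have := congrArg List.length h; simp at this
      rw [if_pos rfl, if_neg hne, h3, Option.bind_some]
      have h1 : nodes.get? (nextId, d) = none := by
        cases hg : nodes.get? (nextId, d) with
        | none => rfl
        | some w => exact absurd (hI.2.1 _ _ hg).1 (lt_irrefl _)
      have hne2 : (nextId, d) ≠ (cur, c) := by
        intro h
        have hcur : cur < nextId := trieFollow_lt hI hp
        rw [Prod.ext_iff] at h
        omega
      rw [PySem.Dict.get?_insert_of_ne _ _ hne2, h1]
      rfl
    · rw [if_neg ht]
      cases hft : trieFollow nodes 0 t with
      | none =>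
        have hne3 : t ++ [d] ≠ p ++ [c] := by
          intro h
          rcases List.append_inj' h rfl with ⟨h1, _⟩
          subst h1; rw [hp] at hft; simp at hft
        rw [if_neg hne3]
        rfl
      | some v =>
        rw [Option.bind_some, Option.bind_some]
        by_cases hvc : (v, d) = (cur, c)
        · have hv : v = cur := (Prod.ext_iff.mp hvc).1
          have hd : d = c := (Prod.ext_iff.mp hvc).2
          subst hv; subst hd
          have hteq : t = p := hI.2.2.2 t p v hft hp
          subst hteq
          rw [if_pos rfl, PySem.Dict.get?_insert_self]
        · rw [PySem.Dict.get?_insert_of_ne _ _ hvc]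
          have hne4 : t ++ [d] ≠ p ++ [c] := by
            intro h
            rcases List.append_inj' h rfl with ⟨h1, h2⟩
            subst h1
            rw [hp] at hft
            cases hft
            exact hvc (by rw [List.singleton_inj] at h2; rw [h2])
          rw [if_neg hne4]

-- the full loop invariant between A's state and B's state after processing `done`
def LoopInv (done : List Char)
    (seen : PySem.Set String) (partition : String) (partsA : List String)
    (nodes : PySem.Dict (Int × Char) Int) (nextId cur start : Int)
    (partsB : List String) : Prop :=
  partsA = partsB ∧
  partition.toList <:+ done ∧
  start = (done.length : Int) - (partition.toList.length : Int) ∧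
  trieFollow nodes 0 partition.toList = some cur ∧
  TrieInv nodes nextId seen

lemma slice_emit (s : String) (done rest : List Char) (c : Char)
    (hs : s.toList = done ++ c :: rest) (partition : String)
    (hsuf : partition.toList <:+ done) :
    PySem.Str.slice s (some ((done.length : Int) - (partition.toList.length : Int)))
        (some ((done.length : Int) + 1)) = partition.push c := by
  apply String.toList_inj.mp
  rcases hsuf with ⟨pre, hpre⟩
  have hlenpre : pre.length + partition.toList.length = done.length := by
    have := congrArg List.length hpre; simpa using this
  have h1 : (done.length : Int) - (partition.toList.length : Int) = ((pre.length : Nat) : Int) := by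
    omega
  have h2 : (done.length : Int) + 1 = ((done.length + 1 : Nat) : Int) := by push_cast; ring
  rw [h1, h2]
  simp only [PySem.Str.toList_slice, PySem.Chars.slice_eq_listSlice, PySem.List.slice_natCast,
    String.toList_push]
  rw [hs, ← hpre, List.append_assoc, List.drop_left]
  have h3 : (pre ++ partition.toList).length + 1 - pre.length = partition.toList.length + 1 := by
    simp only [List.length_append]; omega
  rw [h3]
  have h4 : partition.toList ++ c :: rest = (partition.toList ++ [c]) ++ rest := by simp
  rw [h4, List.take_left' (by simp)]

lemma step_inv (s : String) (done rest : List Char) (c : Char)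
    (hs : s.toList = done ++ c :: rest)
    (seen : PySem.Set String) (partition : String) (partsA : List String)
    (nodes : PySem.Dict (Int × Char) Int) (nextId cur start : Int) (partsB : List String)
    (hInv : LoopInv done seen partition partsA nodes nextId cur start partsB) :
    ∃ seen' partition' partsA' nodes' nextId' cur' start' partsB',
      stepA (seen, partition, partsA) c = (seen', partition', partsA') ∧
      stepB s (nodes, nextId, cur, start, partsB) ((done.length : Int), c)
        = (nodes', nextId', cur', start', partsB') ∧
      LoopInv (done ++ [c]) seen' partition' partsA' nodes' nextId' cur' start' partsB' := by
  obtain ⟨hparts, hsuf, hstart, hfol, hTI⟩ := hInv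
  obtain ⟨hpaths, hfresh, hone, hinj⟩ := hTI
  -- the two tests agree
  have hfolc : trieFollow nodes 0 (partition.toList ++ [c]) = nodes.get? (cur, c) := by
    rw [trieFollow_snoc, hfol, Option.bind_some]
  have htest : (nodes.get? (cur, c)).isSome
      ↔ String.ofList (partition.toList ++ [c]) ∈ seen := by
    rw [← hfolc, hpaths]
    simp
  have hofl : String.ofList (partition.toList ++ [c]) = partition.push c := by
    apply String.toList_inj.mp; simp
  cases hg : nodes.get? (cur, c) with
  | none =>
    -- new edge: A emits, B emits
    have hnotin : partition.push c ∉ seen := by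
      rw [← hofl]; intro hmem
      have := htest.mpr hmem; rw [hg] at this; simp at this
    have hcont : PySem.Set.contains seen (partition.push c) = false := by
      cases hc : PySem.Set.contains seen (partition.push c)
      · rfl
      · exact absurd ((PySem.Set.contains_iff _ _).mp hc) hnotin
    refine ⟨PySem.Set.add seen (partition.push c), "", partsA ++ [partition.push c],
        nodes.insert (cur, c) nextId, nextId + 1, 0, (done.length : Int) + 1,
        partsB ++ [PySem.Str.slice s (some start) (some ((done.length : Int) + 1))], ?_, ?_, ?_⟩
    · simp [stepA, hnotin]
    · simp [stepB, hg]
    · have hslice : PySem.Str.slice s (some start) (some ((done.length : Int) + 1))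
          = partition.push c := by
        rw [hstart]; exact slice_emit s done rest c hs partition hsuf
      have hTI' : TrieInv (nodes.insert (cur, c) nextId) (nextId + 1)
          (PySem.Set.add seen (partition.push c)) := by
        have hchar := trieFollow_insert ⟨hpaths, hfresh, hone, hinj⟩ hfol hg
        refine ⟨?_, ?_, by omega, ?_⟩
        · intro t
          rw [hchar t]
          by_cases ht : t = partition.toList ++ [c]
          · subst ht
            simp [PySem.Set.mem_add, hofl]
          · simp only [ht, if_neg, not_false_iff, hpaths]
            constructor
            · rintro (rfl | hmem)
              · exact Or.inl rfl
              · exact Or.inr ((PySem.Set.mem_add _ _ _).mpr (Or.inl hmem))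
            · rintro (rfl | hmem)
              · exact Or.inl rfl
              · rcases (PySem.Set.mem_add _ _ _).mp hmem with hmem | heq
                · exact Or.inr hmem
                · exfalso; apply ht
                  have := heq.trans hofl.symm
                  exact String.ofList_inj.mp this
        · intro k v hk
          by_cases hkc : k = (cur, c)
          · subst hkc
            rw [PySem.Dict.get?_insert_self] at hk
            cases hk
            have hcur : cur < nextId := trieFollow_lt ⟨hpaths, hfresh, hone, hinj⟩ hfol
            exact ⟨by omega, by omega, by omega⟩
          · rw [PySem.Dict.get?_insert_of_ne _ _ hkc] at hk
            have := hfresh k v hk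
            exact ⟨by omega, this.2.1, by omega⟩
        · intro t₁ t₂ v h₁ h₂
          rw [hchar t₁] at h₁; rw [hchar t₂] at h₂
          by_cases h₁c : t₁ = partition.toList ++ [c] <;>
            by_cases h₂c : t₂ = partition.toList ++ [c]
          · rw [h₁c, h₂c]
          · exfalso
            rw [if_pos h₁c] at h₁; rw [if_neg h₂c] at h₂
            cases h₁
            exact absurd (trieFollow_lt ⟨hpaths, hfresh, hone, hinj⟩ h₂) (lt_irrefl _)
          · exfalso
            rw [if_neg h₁c] at h₁; rw [if_pos h₂c] at h₂
            cases h₂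
            exact absurd (trieFollow_lt ⟨hpaths, hfresh, hone, hinj⟩ h₁) (lt_irrefl _)
          · rw [if_neg h₁c] at h₁; rw [if_neg h₂c] at h₂
            exact hinj t₁ t₂ v h₁ h₂
      refine ⟨by rw [hparts, hslice], by simp, by simp, by simp [trieFollow], hTI'⟩
  | some nxt =>
    -- existing edge: A keeps extending, B walks down
    have hin : partition.push c ∈ seen := by
      rw [← hofl]; exact htest.mp (by rw [hg]; rfl)
    have hcont : PySem.Set.contains seen (partition.push c) = true := by
      exact (PySem.Set.contains_iff _ _).mpr hin
    refine ⟨seen, partition.push c, partsA, nodes, nextId, nxt, start, partsB, ?_, ?_, ?_⟩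
    · simp [stepA, hin]
    · simp [stepB, hg]
    · refine ⟨hparts, ?_, ?_, ?_, hpaths, hfresh, hone, hinj⟩
      · obtain ⟨pre, hpre⟩ := hsuf
        exact ⟨pre, by rw [String.toList_push, ← List.append_assoc, hpre]⟩
      · rw [String.toList_push, hstart]; simp only [List.length_append, List.length_cons, List.length_nil]; omega
      · rw [String.toList_push, hfolc, hg]

-- main loop lemma
lemma loop_eq (rest : List Char) : ∀ (done : List Char) (s : String),
    s.toList = done ++ rest →
    ∀ seen partition partsA nodes nextId cur start partsB,
    LoopInv done seen partition partsA nodes nextId cur start partsB →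
    (rest.foldl stepA (seen, partition, partsA)).2.2
      = ((PySem.List.enumerate rest (done.length : Int)).foldl (stepB s)
          (nodes, nextId, cur, start, partsB)).2.2.2.2 := by
  induction rest with
  | nil =>
    intro done s hs seen partition partsA nodes nextId cur start partsB hInv
    simpa [PySem.List.enumerate] using hInv.1
  | cons c rest ih =>
    intro done s hs seen partition partsA nodes nextId cur start partsB hInv
    obtain ⟨seen', partition', partsA', nodes', nextId', cur', start', partsB', hA, hB, hInv'⟩ :=
      step_inv s done rest c hs seen partition partsA nodes nextId cur start partsB hInv
    rw [PySem.List.enumerate_cons]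
    simp only [List.foldl_cons, hA, hB]
    have hlen : (done.length : Int) + 1 = ((done ++ [c]).length : Int) := by simp
    rw [hlen]
    exact ih (done ++ [c]) s (by rw [hs]; simp) _ _ _ _ _ _ _ _ hInv'

-- ===== VERDICT (by name: the statement is the Claim_ definition above) =====
theorem partition_string_spec : Claim_equal_partition_string := by
  intro s _hdom
  unfold Spec_partition_string partition_string partition_string_alt
  exact loop_eq s.toList [] s (by simp) PySem.Set.empty "" [] PySem.Dict.empty 1 0 0 []
    ⟨rfl, by simp, by simp, by simp [trieFollow],
     by
       refine ⟨?_, ?_, le_refl 1, ?_⟩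
       · intro t
         cases t with
         | nil => simp [trieFollow]
         | cons c t => simp [trieFollow, PySem.Dict.get?_empty, PySem.Set.empty]
       · intro k v hk; simp [PySem.Dict.get?_empty] at hk
       · intro t₁ t₂ v h₁ h₂
         cases t₁ with
         | nil => cases t₂ with
           | nil => rfl
           | cons c t => simp [trieFollow, PySem.Dict.get?_empty] at h₂
         | cons c t => simp [trieFollow, PySem.Dict.get?_empty] at h₁⟩
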